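-- pv_equiv track=rewrite | github.com/GarrettFromTaiwan/No-Limit-Holdem-Poker | No_Limit_Holdem_Poker.py | No_straight_hand
-- ===== SOURCE A (Python) =====
-- from collections import Counter
--
-- def No_straight_hand(p_values):
--     # Return the biggest hands if no straight is in the 5-7 cards
--     # hands = [ [hands type, the biggest hands] ] in the 5-7 cards
--     sorted_v = sorted(p_values, reverse=True)
--     value_count = Counter(sorted_v).most_common()
--     t = []
--     hands = [t]
--     ## One pair(2)
--     if value_count[0][1] == 2 and value_count[1][1] == 1:
--         t.append(2)
--         for i in range(2):
--             t.append(value_count[0][0])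
--         for i in range(1,4):
--             t.append(value_count[i][0])
--         return hands
--     ## Two Pair(3)
--     elif value_count[0][1] == 2 and value_count[1][1] == 2:
--         t.append(3)
--         for i in range(2):
--             t.append(value_count[0][0])
--         for i in range(2):
--             t.append(value_count[1][0])
--         if value_count[2][1] == 1:
--             t.append(value_count[2][0])
--             return hands
--         elif value_count[2][1] == 2:
--             if value_count[2][0] < value_count[3][0]:
--                 t.append(value_count[3][0])
--                 return hands
--             elif value_count[2][0] > value_count[3][0]:
--                 t.append(value_count[2][0])
--                 return hands
--     ## High Card(1)
--     elif value_count[0][1] == 1: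
--         t.append(1)
--         for i in range(5):
--             t.append(value_count[i][0])
--         return hands
--     ## Trips(4)
--     elif value_count[0][1] == 3 and value_count[1][1] == 1:
--         t.append(4)
--         for i in range(3):
--             t.append(value_count[0][0])
--         for i in range(1,3):
--             t.append(value_count[i][0])
--         return hands
--     ## Full House(7)
--     elif value_count[0][1] == 3 and value_count[1][1] >= 2:
--         t.append(7)
--         for i in range(3):
--             t.append(value_count[0][0])
--         for i in range(2):
--             t.append(value_count[1][0])
--         return hands
--     ## Quads(8)
--     elif value_count[0][1] == 4:
--         t.append(8)
--         for i in range(4):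
--             t.append(value_count[0][0])
--         if len(value_count) > 2:
--             if value_count[1][0] < value_count[2][0]:
--                 t.append(value_count[2][0])
--                 return hands
--             elif value_count[1][0] > value_count[2][0]:
--                 t.append(value_count[1][0])
--                 return hands
--         elif len(value_count) == 2:
--             t.append(value_count[1][0])
--             return hands
-- ===== SOURCE B (Python) =====
-- def No_straight_hand(p_values):
--     # Partition the distinct card values (scanned once in descending order) into
--     # multiplicity buckets, then dispatch on which buckets are inhabited; kickers
--     # are maxima over the leftover buckets.
--     cnt = {}
--     for v in p_values:
--         cnt[v] = cnt.get(v, 0) + 1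
--     groups = {1: [], 2: [], 3: [], 4: []}
--     for v in sorted(cnt, reverse=True):
--         groups[cnt[v]].append(v)
--     singles, pairs, trips, quads = groups[1], groups[2], groups[3], groups[4]
--     if quads:
--         q = quads[0]
--         return [[8, q, q, q, q, max(trips + pairs + singles)]]
--     if trips:
--         t = trips[0]
--         fullers = trips[1:] + pairs
--         if fullers:
--             f = fullers[0]
--             return [[7, t, t, t, f, f]]
--         return [[4, t, t, t, singles[0], singles[1]]]
--     if len(pairs) >= 2:
--         p0, p1 = pairs[0], pairs[1]
--         return [[3, p0, p0, p1, p1, max(pairs[2:] + singles)]]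
--     if pairs:
--         p = pairs[0]
--         return [[2, p, p, singles[0], singles[1], singles[2]]]
--     return [[1, singles[0], singles[1], singles[2], singles[3], singles[4]]]
-- ===== Notes on version B (the rewrite author's own statement) =====
-- stated objective: alternative
-- what changed: B never builds or sorts A's most_common list of (value,count) entries: it partitions the distinct values (one descending scan) into four multiplicity buckets and dispatches on which buckets are inhabited, reading pairs/trips/quads positionally from their buckets and computing kickers as maxima over the leftover buckets instead of A's positional comparisons on the sorted entry list.
-- outside the precondition, e.g. on No_straight_hand([7, 7, 7, 7, 7]): A returns None, B raises KeyError; on No_straight_hand([4, 4, 3, 3, 2, 2]): A raises IndexError, B returns [[3, 4, 4, 3, 3, 2]]; on No_straight_hand([9, 9, 5, 5, 3, 3, 2, 2, 7]): A returns [[3, 9, 9, 5, 5, 3]], B returns [[3, 9, 9, 5, 5, 7]]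
import Mathlib
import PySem

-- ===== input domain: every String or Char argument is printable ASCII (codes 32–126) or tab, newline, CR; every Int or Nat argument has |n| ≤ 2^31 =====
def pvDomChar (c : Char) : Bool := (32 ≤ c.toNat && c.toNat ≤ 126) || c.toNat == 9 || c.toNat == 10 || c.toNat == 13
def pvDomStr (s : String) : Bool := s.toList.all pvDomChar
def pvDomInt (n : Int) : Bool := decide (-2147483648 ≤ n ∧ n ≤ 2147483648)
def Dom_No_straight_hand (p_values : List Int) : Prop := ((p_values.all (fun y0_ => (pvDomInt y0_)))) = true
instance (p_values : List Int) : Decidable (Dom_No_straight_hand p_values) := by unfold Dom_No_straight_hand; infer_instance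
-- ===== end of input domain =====

-- B avoids A's most_common entry list entirely: it partitions the distinct values (one descending
-- scan) into four multiplicity buckets and dispatches on which buckets are inhabited, with kickers as
-- maxima over the leftover buckets (objective: alternative decomposition, same cost).

-- ===== PORT A =====
-- (pyGet? = none) is Python's IndexError: it is reached only outside Pre_No_straight_hand
def pvIdxA (vc : List (Int × Int)) (i : Int) : Int × Int :=
  (PySem.List.pyGet? vc i).getD (0, 0)

-- the body of A after value_count has been computed (helper for readability; same code, same order)
def pvCoreA (vc : List (Int × Int)) : List (List Int) :=
  if (pvIdxA vc 0).2 = 2 ∧ (pvIdxA vc 1).2 = 1 then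
    let t : List Int := [2]
    let t := (PySem.List.pyRange 0 2 1).foldl (fun t _ => t ++ [(pvIdxA vc 0).1]) t
    let t := (PySem.List.pyRange 1 4 1).foldl (fun t i => t ++ [(pvIdxA vc i).1]) t
    [t]
  else if (pvIdxA vc 0).2 = 2 ∧ (pvIdxA vc 1).2 = 2 then
    let t : List Int := [3]
    let t := (PySem.List.pyRange 0 2 1).foldl (fun t _ => t ++ [(pvIdxA vc 0).1]) t
    let t := (PySem.List.pyRange 0 2 1).foldl (fun t _ => t ++ [(pvIdxA vc 1).1]) t
    if (pvIdxA vc 2).2 = 1 then [t ++ [(pvIdxA vc 2).1]]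
    else if (pvIdxA vc 2).2 = 2 then
      if (pvIdxA vc 2).1 < (pvIdxA vc 3).1 then [t ++ [(pvIdxA vc 3).1]]
      else if (pvIdxA vc 3).1 < (pvIdxA vc 2).1 then [t ++ [(pvIdxA vc 2).1]]
      else []  -- Python falls off the end of the function: returns None (no list value; outside Pre_)
    else []    -- returns None (outside Pre_)
  else if (pvIdxA vc 0).2 = 1 then
    [(PySem.List.pyRange 0 5 1).foldl (fun t i => t ++ [(pvIdxA vc i).1]) [1]]
  else if (pvIdxA vc 0).2 = 3 ∧ (pvIdxA vc 1).2 = 1 then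
    let t : List Int := [4]
    let t := (PySem.List.pyRange 0 3 1).foldl (fun t _ => t ++ [(pvIdxA vc 0).1]) t
    let t := (PySem.List.pyRange 1 3 1).foldl (fun t i => t ++ [(pvIdxA vc i).1]) t
    [t]
  else if (pvIdxA vc 0).2 = 3 ∧ 2 ≤ (pvIdxA vc 1).2 then
    let t : List Int := [7]
    let t := (PySem.List.pyRange 0 3 1).foldl (fun t _ => t ++ [(pvIdxA vc 0).1]) t
    let t := (PySem.List.pyRange 0 2 1).foldl (fun t _ => t ++ [(pvIdxA vc 1).1]) t
    [t]
  else if (pvIdxA vc 0).2 = 4 then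
    let t : List Int := [8]
    let t := (PySem.List.pyRange 0 4 1).foldl (fun t _ => t ++ [(pvIdxA vc 0).1]) t
    if 2 < (vc.length : Int) then
      if (pvIdxA vc 1).1 < (pvIdxA vc 2).1 then [t ++ [(pvIdxA vc 2).1]]
      else if (pvIdxA vc 2).1 < (pvIdxA vc 1).1 then [t ++ [(pvIdxA vc 1).1]]
      else []  -- returns None (outside Pre_)
    else if (vc.length : Int) = 2 then [t ++ [(pvIdxA vc 1).1]]
    else []    -- returns None (outside Pre_)
  else []      -- returns None (outside Pre_)

def No_straight_hand (p_values : List Int) : List (List Int) :=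
  let sorted_v := PySem.List.sorted p_values (fun x => x) true
  -- Counter(sorted_v).most_common() = sorted(counter.items(), key=itemgetter(1), reverse=True) in CPython
  -- (a stable sort by count descending): ported exactly as that stable sort
  pvCoreA (PySem.List.sorted (PySem.Dict.counter sorted_v).items (fun kv => kv.2) true)

-- ===== PORT B =====
-- the dispatch of Source B after the four buckets have been computed (same code, same order as Source B;
-- (pyGet? = none) is IndexError and (max? = none) is ValueError — reached only outside Pre_)
def pvCoreB (singles pairs trips quads : List Int) : List (List Int) :=
  if quads ≠ [] then
    match PySem.List.pyGet? quads 0, PySem.List.max? (trips ++ pairs ++ singles) (fun v => v) with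
    | some q, some m => [[8, q, q, q, q, m]]
    | _, _ => []          -- max() of an empty sequence: ValueError (outside Pre_)
  else if trips ≠ [] then
    match PySem.List.pyGet? trips 0 with
    | some t =>
      let fullers := PySem.List.slice trips (some 1) none ++ pairs
      if fullers ≠ [] then
        match PySem.List.pyGet? fullers 0 with
        | some f => [[7, t, t, t, f, f]]
        | none => []
      else
        match PySem.List.pyGet? singles 0, PySem.List.pyGet? singles 1 with
        | some s0, some s1 => [[4, t, t, t, s0, s1]]
        | _, _ => []      -- singles[0] / singles[1]: IndexError (outside Pre_)
    | none => []
  else if 2 ≤ (pairs.length : Int) then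
    match PySem.List.pyGet? pairs 0, PySem.List.pyGet? pairs 1,
          PySem.List.max? (PySem.List.slice pairs (some 2) none ++ singles) (fun v => v) with
    | some p0, some p1, some m => [[3, p0, p0, p1, p1, m]]
    | _, _, _ => []       -- max() of an empty sequence: ValueError (outside Pre_)
  else if pairs ≠ [] then
    match PySem.List.pyGet? pairs 0, PySem.List.pyGet? singles 0, PySem.List.pyGet? singles 1,
          PySem.List.pyGet? singles 2 with
    | some p, some s0, some s1, some s2 => [[2, p, p, s0, s1, s2]]
    | _, _, _, _ => []    -- singles[i]: IndexError (outside Pre_)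
  else
    match PySem.List.pyGet? singles 0, PySem.List.pyGet? singles 1, PySem.List.pyGet? singles 2,
          PySem.List.pyGet? singles 3, PySem.List.pyGet? singles 4 with
    | some s0, some s1, some s2, some s3, some s4 => [[1, s0, s1, s2, s3, s4]]
    | _, _, _, _, _ => [] -- singles[i]: IndexError (outside Pre_)

def No_straight_hand_alt (p_values : List Int) : List (List Int) :=
  let cnt := p_values.foldl (fun d v => d.insert v (d.getD v 0 + 1)) (PySem.Dict.empty : PySem.Dict Int Int)
  -- groups = {1: [], 2: [], 3: [], 4: []}; groups[cnt[v]].append(v) for v in sorted(cnt, reverse=True)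
  -- (inside Pre_ every count is 1..4, so d[k].append is d.modify k [] (· ++ [v]) on an existing key)
  let groups : PySem.Dict Int (List Int) :=
    ((((PySem.Dict.empty).insert 1 []).insert 2 []).insert 3 []).insert 4 []
  let groups := (PySem.List.sorted cnt.keys (fun x => x) true).foldl
      (fun g v => g.modify (cnt.getD v 0) [] (fun l => l ++ [v])) groups
  pvCoreB (groups.getD 1 []) (groups.getD 2 []) (groups.getD 3 []) (groups.getD 4 [])

-- ===== PRECONDITION & SPEC =====
-- Pre_ restricts to the function's documented natural domain ("in the 5-7 cards") with at most 4 copies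
-- of a value (a real deck). Outside it A raises IndexError (e.g. fewer than 5 cards, or exactly three
-- pairs in 6 cards) or falls off the end returning None (five of a kind) — or, for 8+ cards, returns a
-- value produced by comparing only two fixed most_common slots, which B does not reproduce.
def Pre_No_straight_hand (p_values : List Int) : Prop :=
  5 ≤ p_values.length ∧ p_values.length ≤ 7 ∧ (∀ v ∈ p_values, p_values.count v ≤ 4) ∧
    ¬(p_values.length = 6 ∧ (PySem.Set.ofList p_values).length = 3 ∧ ∀ v ∈ p_values, p_values.count v = 2)
instance (p_values : List Int) : Decidable (Pre_No_straight_hand p_values) := by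
  unfold Pre_No_straight_hand; infer_instance

def pvWitness_No_straight_hand : List Int := [2, 3, 5, 7, 11]

def Spec_No_straight_hand (p_values : List Int) (out : List (List Int)) : Prop := out = No_straight_hand_alt p_values
instance (p_values : List Int) (out : List (List Int)) : Decidable (Spec_No_straight_hand p_values out) := by
  unfold Spec_No_straight_hand; infer_instance

-- ===== CLAIM (what is proved, stated in full; the proofs are below) =====
def Claim_equal_No_straight_hand : Prop := ∀ (p_values : List Int), Dom_No_straight_hand p_values → Pre_No_straight_hand p_values → Spec_No_straight_hand p_values (No_straight_hand p_values)

-- ===== LEMMAS AND PROOFS =====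

def pvLexGT (a b : Int × Int) : Prop := b.2 < a.2 ∨ (a.2 = b.2 ∧ b.1 < a.1)

theorem pvLexGT_trans {a b c : Int × Int} (h1 : pvLexGT a b) (h2 : pvLexGT b c) : pvLexGT a c := by
  unfold pvLexGT at *
  rcases h1 with h1 | ⟨h1, h1'⟩ <;> rcases h2 with h2 | ⟨h2, h2'⟩ <;> [left; left; left; right] <;> omega

theorem pvLexGT_snd_le {a b : Int × Int} (h : pvLexGT a b) : b.2 ≤ a.2 := by
  rcases h with h | ⟨h, _⟩ <;> omega

theorem pvInsertA_pairwise (x : Int × Int) (ys : List (Int × Int))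
    (hs : ys.Pairwise pvLexGT) (hlt : ∀ y ∈ ys, x.1 < y.1) :
    (PySem.List.insertBy (fun a b => decide (b.2 < a.2)) x ys).Pairwise pvLexGT := by
  induction ys with
  | nil => simp [PySem.List.insertBy]
  | cons y ys ih =>
    rw [List.pairwise_cons] at hs
    simp only [PySem.List.insertBy]
    split_ifs with h
    · -- x :: y :: ys, with y.2 < x.2
      simp only [decide_eq_true_eq] at h
      refine List.Pairwise.cons ?_ (List.Pairwise.cons hs.1 hs.2)
      intro z hz
      rcases List.mem_cons.mp hz with rfl | hz
      · exact Or.inl h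
      · exact Or.inl (lt_of_le_of_lt (pvLexGT_snd_le (hs.1 z hz)) h)
    · -- y :: insertBy x ys, with x.2 ≤ y.2
      simp only [decide_eq_true_eq, not_lt] at h
      refine List.Pairwise.cons ?_ (ih hs.2 (fun z hz => hlt z (List.mem_cons_of_mem _ hz)))
      intro z hz
      rw [PySem.List.mem_insertBy] at hz
      rcases hz with rfl | hz
      · rcases lt_or_eq_of_le h with h' | h'
        · exact Or.inl h'
        · exact Or.inr ⟨h'.symm, hlt y (List.mem_cons_self)⟩
      · exact hs.1 z hz

theorem pvFoldA_pairwise (W : List (Int × Int)) (hW : W.Pairwise (fun a b => b.1 < a.1)) :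
    (PySem.List.sorted W (fun kv => kv.2) true).Pairwise pvLexGT := by
  rw [PySem.List.sorted_rev_eq_foldl_insertBy]
  suffices h : ∀ acc : List (Int × Int), acc.Pairwise pvLexGT →
      (∀ y ∈ acc, ∀ w ∈ W, w.1 < y.1) →
      (W.foldl (fun acc x => PySem.List.insertBy (fun a b => decide ((fun kv : Int × Int => kv.2) b < (fun kv : Int × Int => kv.2) a)) x acc) acc).Pairwise pvLexGT by
    exact h [] (List.Pairwise.nil) (by simp)
  induction W with
  | nil => intro acc h _; simpa using h
  | cons w W ih =>
    rw [List.pairwise_cons] at hW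
    intro acc hacc hmem
    simp only [List.foldl_cons]
    refine ih hW.2 _ (pvInsertA_pairwise w acc hacc (fun y hy => hmem y hy w List.mem_cons_self)) ?_
    intro y hy w' hw'
    rw [PySem.List.mem_insertBy] at hy
    rcases hy with rfl | hy
    · exact hW.1 w' hw'
    · exact hmem y hy w' (List.mem_cons_of_mem _ hw')

theorem pvBeforeB_iff (a b : Int × Int) :
    (decide ((-a.2 : Int) < -b.2) || (!decide ((-b.2 : Int) < -a.2) && decide ((-a.1 : Int) < -b.1))) = true ↔
      pvLexGT a b := by
  unfold pvLexGT
  simp only [Bool.or_eq_true, Bool.and_eq_true, Bool.not_eq_true', decide_eq_true_eq, decide_eq_false_iff_not]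
  omega

theorem pvInsertB_pairwise (x : Int × Int) (ys : List (Int × Int))
    (hs : ys.Pairwise pvLexGT) (hne : ∀ y ∈ ys, x.1 ≠ y.1) :
    (PySem.List.insertBy
      (fun a b => decide ((-a.2 : Int) < -b.2) || (!decide ((-b.2 : Int) < -a.2) && decide ((-a.1 : Int) < -b.1)))
      x ys).Pairwise pvLexGT := by
  induction ys with
  | nil => simp [PySem.List.insertBy]
  | cons y ys ih =>
    rw [List.pairwise_cons] at hs
    simp only [PySem.List.insertBy]
    split_ifs with h
    · rw [pvBeforeB_iff] at h
      refine List.Pairwise.cons ?_ (List.Pairwise.cons hs.1 hs.2)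
      intro z hz
      rcases List.mem_cons.mp hz with rfl | hz
      · exact h
      · exact pvLexGT_trans h (hs.1 z hz)
    · have h' : ¬ pvLexGT x y := by rw [← pvBeforeB_iff]; simpa using h
      have hyx : pvLexGT y x := by
        have hne' := hne y List.mem_cons_self
        unfold pvLexGT at *
        omega
      refine List.Pairwise.cons ?_ (ih hs.2 (fun z hz => hne z (List.mem_cons_of_mem _ hz)))
      intro z hz
      rw [PySem.List.mem_insertBy] at hz
      rcases hz with rfl | hz
      · exact hyx
      · exact hs.1 z hz

theorem pvFoldB_pairwise (W : List (Int × Int)) (hW : (W.map Prod.fst).Nodup) :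
    (PySem.List.sorted2 W (fun kv => -kv.2) (fun kv => -kv.1) false).Pairwise pvLexGT := by
  rw [List.Nodup, List.pairwise_map] at hW
  show (W.foldl (fun acc x => PySem.List.insertBy
      (fun a b => decide ((-a.2 : Int) < -b.2) || (!decide ((-b.2 : Int) < -a.2) && decide ((-a.1 : Int) < -b.1)))
      x acc) []).Pairwise pvLexGT
  suffices h : ∀ acc : List (Int × Int), acc.Pairwise pvLexGT →
      (∀ y ∈ acc, ∀ w ∈ W, w.1 ≠ y.1) →
      (W.foldl (fun acc x => PySem.List.insertBy
        (fun a b => decide ((-a.2 : Int) < -b.2) || (!decide ((-b.2 : Int) < -a.2) && decide ((-a.1 : Int) < -b.1)))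
        x acc) acc).Pairwise pvLexGT by
    exact h [] List.Pairwise.nil (by simp)
  induction W with
  | nil => intro acc h _; simpa using h
  | cons w W ih =>
    rw [List.pairwise_cons] at hW
    intro acc hacc hmem
    simp only [List.foldl_cons]
    refine ih hW.2 _ (pvInsertB_pairwise w acc hacc (fun y hy => hmem y hy w List.mem_cons_self)) ?_
    intro y hy w' hw'
    rw [PySem.List.mem_insertBy] at hy
    rcases hy with rfl | hy
    · exact (hW.1 w' hw').symm
    · exact hmem y hy w' (List.mem_cons_of_mem _ hw')

theorem pvEq_of_perm_of_pairwise {l1 l2 : List (Int × Int)} (hp : l1.Perm l2)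
    (h1 : l1.Pairwise pvLexGT) (h2 : l2.Pairwise pvLexGT) : l1 = l2 := by
  refine hp.eq_of_pairwise ?_ h1 h2
  intro a b _ _ hab hba
  unfold pvLexGT at hab hba
  have : a.1 = b.1 ∧ a.2 = b.2 := by omega
  exact Prod.ext this.1 this.2

theorem pvOfList_sublist (xs : List Int) : (PySem.Set.ofList xs).Sublist xs := by
  induction xs with
  | nil => simp [PySem.Set.ofList]
  | cons x xs ih =>
    rw [PySem.Set.ofList_cons]
    exact List.Sublist.cons₂ x (List.Sublist.trans (List.filter_sublist) ih)

-- A's sorted-by-count-of-a-desc-sorted-counter equals the (count desc, value desc) sort of the counter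
theorem pvEntries_eq (p_values : List Int) :
    PySem.List.sorted (PySem.Dict.counter (PySem.List.sorted p_values (fun x => x) true)).items
      (fun kv => kv.2) true =
    PySem.List.sorted2 (PySem.Dict.counter p_values).items (fun kv => -kv.2) (fun kv => -kv.1) false := by
  set sv := PySem.List.sorted p_values (fun x => x) true with hsv_def
  have hsv : sv.Pairwise (fun a b : Int => b ≤ a) := PySem.List.sorted_pairwise_rev p_values (fun x => x)
  have hD : (PySem.Set.ofList sv).Pairwise (fun a b : Int => b < a) := by
    have h1 := hsv.sublist (pvOfList_sublist sv)
    have h2 : (PySem.Set.ofList sv).Pairwise (fun a b : Int => a ≠ b) := PySem.Set.nodup_ofList sv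
    exact (h1.and h2).imp (fun h => lt_of_le_of_ne h.1 (Ne.symm h.2))
  have hitemsA : (PySem.Dict.counter sv).items
      = (PySem.Set.ofList sv).map (fun k => (k, (sv.count k : Int))) := PySem.Dict.items_counter sv
  have hitemsB : (PySem.Dict.counter p_values).items
      = (PySem.Set.ofList p_values).map (fun k => (k, (p_values.count k : Int))) := PySem.Dict.items_counter p_values
  have hApw : (PySem.List.sorted (PySem.Dict.counter sv).items (fun kv => kv.2) true).Pairwise pvLexGT := by
    apply pvFoldA_pairwise
    rw [hitemsA, List.pairwise_map]
    exact hD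
  have hBpw : (PySem.List.sorted2 (PySem.Dict.counter p_values).items (fun kv => -kv.2) (fun kv => -kv.1) false).Pairwise pvLexGT := by
    apply pvFoldB_pairwise
    rw [hitemsB, List.map_map]
    have : (Prod.fst ∘ fun k => ((k : Int), (p_values.count k : Int))) = id := rfl
    rw [this, List.map_id]
    exact PySem.Set.nodup_ofList p_values
  have hperm1 : sv.Perm p_values := PySem.List.sorted_perm p_values (fun x => x) true
  have hcount : ∀ k, sv.count k = p_values.count k := fun k => hperm1.count_eq k
  have hmapA : (PySem.Dict.counter sv).items
      = (PySem.Set.ofList sv).map (fun k => (k, (p_values.count k : Int))) := by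
    rw [hitemsA]; exact List.map_congr_left (fun k _ => by rw [hcount k])
  have hsetperm : (PySem.Set.ofList sv).Perm (PySem.Set.ofList p_values) := by
    rw [List.perm_ext_iff_of_nodup (PySem.Set.nodup_ofList sv) (PySem.Set.nodup_ofList p_values)]
    intro a
    rw [PySem.Set.mem_ofList, PySem.Set.mem_ofList]
    exact hperm1.mem_iff
  have hitemsperm : ((PySem.Dict.counter sv).items).Perm ((PySem.Dict.counter p_values).items) := by
    rw [hmapA, hitemsB]
    exact hsetperm.map _
  exact pvEq_of_perm_of_pairwise
    (((PySem.List.sorted_perm _ _ _).trans hitemsperm).trans (PySem.List.sorted2_perm _ _ _ _).symm)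
    hApw hBpw

theorem pvCountsB_eq (p_values : List Int) :
    p_values.foldl (fun d v => d.insert v (d.getD v 0 + 1)) (PySem.Dict.empty : PySem.Dict Int Int) =
      PySem.Dict.counter p_values :=
  PySem.Dict.foldl_insert_getD_add_one_eq_counter p_values

-- the four buckets produced by B's grouping fold are the multiplicity filters of the sorted key list
theorem pvBucket_eq (ks : List Int) (cnt : PySem.Dict Int Int) (c : Int) (hc : c = 1 ∨ c = 2 ∨ c = 3 ∨ c = 4) :
    (ks.foldl (fun g v => g.modify (cnt.getD v 0) [] (fun l => l ++ [v]))
      (((((PySem.Dict.empty).insert 1 []).insert 2 []).insert 3 []).insert 4 [] : PySem.Dict Int (List Int))).getD c []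
    = ks.filter (fun v => cnt.getD v 0 == c) := by
  have hmap : ks.foldl (fun g v => g.modify (cnt.getD v 0) [] (fun l => l ++ [v]))
      (((((PySem.Dict.empty).insert 1 []).insert 2 []).insert 3 []).insert 4 [] : PySem.Dict Int (List Int))
      = (ks.map (fun v => (cnt.getD v 0, v))).foldl (fun g p => g.modify p.1 [] (fun l => l ++ [p.2]))
      (((((PySem.Dict.empty).insert 1 []).insert 2 []).insert 3 []).insert 4 [] : PySem.Dict Int (List Int)) := by
    rw [List.foldl_map]
  rw [hmap, PySem.Dict.getD_foldl_modify_append, List.filter_map, List.map_map]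
  have hinit : ((((((PySem.Dict.empty).insert 1 []).insert 2 []).insert 3 []).insert 4 [] : PySem.Dict Int (List Int))).getD c [] = [] := by
    rcases hc with rfl | rfl | rfl | rfl <;> rfl
  rw [hinit]
  simp [Function.comp_def]

-- a list whose every element has multiplicity 1..4 is a permutation of its four multiplicity filters
theorem pvCount_filter_eq (ks : List Int) (f : Int → Int) (a c : Int) (h : f a = c) :
    (ks.filter (fun v => f v == c)).count a = ks.count a := by
  induction ks with
  | nil => rfl
  | cons x ks ih =>
    by_cases hx : x = a
    · subst hx; simp [h, ih]
    · simp only [List.filter_cons]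
      split <;> simp [hx, ih]

theorem pvCount_filter_ne (ks : List Int) (f : Int → Int) (a c : Int) (h : f a ≠ c) :
    (ks.filter (fun v => f v == c)).count a = 0 := by
  rw [List.count_eq_zero]
  intro hmem
  rcases List.mem_filter.mp hmem with ⟨_, hc⟩
  exact h (by simpa using hc)

theorem pvPartition_perm (ks : List Int) (f : Int → Int) (hf : ∀ v ∈ ks, f v = 1 ∨ f v = 2 ∨ f v = 3 ∨ f v = 4) :
    (ks.filter (fun v => f v == 4) ++ ks.filter (fun v => f v == 3) ++
     ks.filter (fun v => f v == 2) ++ ks.filter (fun v => f v == 1)).Perm ks := by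
  rw [List.perm_iff_count]
  intro a
  simp only [List.count_append]
  by_cases ha : a ∈ ks
  · rcases hf a ha with h | h | h | h
    · rw [pvCount_filter_eq ks f a 1 h, pvCount_filter_ne ks f a 4 (by omega),
        pvCount_filter_ne ks f a 3 (by omega), pvCount_filter_ne ks f a 2 (by omega)]
      omega
    · rw [pvCount_filter_eq ks f a 2 h, pvCount_filter_ne ks f a 4 (by omega),
        pvCount_filter_ne ks f a 3 (by omega), pvCount_filter_ne ks f a 1 (by omega)]
      omega
    · rw [pvCount_filter_eq ks f a 3 h, pvCount_filter_ne ks f a 4 (by omega),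
        pvCount_filter_ne ks f a 2 (by omega), pvCount_filter_ne ks f a 1 (by omega)]
      omega
    · rw [pvCount_filter_eq ks f a 4 h, pvCount_filter_ne ks f a 3 (by omega),
        pvCount_filter_ne ks f a 2 (by omega), pvCount_filter_ne ks f a 1 (by omega)]
      omega
  · have h0 : ks.count a = 0 := List.count_eq_zero_of_not_mem ha
    have hz : ∀ c : Int, (ks.filter (fun v => f v == c)).count a = 0 := by
      intro c
      rw [List.count_eq_zero]
      exact fun hmem => ha (List.mem_of_mem_filter hmem)
    simp [hz, h0]

-- index/range/slice evaluation lemmas for the case analysis of pvCore_eq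
theorem pvIdxA_zero (x : Int × Int) (l : List (Int × Int)) : pvIdxA (x :: l) 0 = x := by
  simp [pvIdxA, PySem.List.pyGet?, PySem.List.pyIdx?]

theorem pvIdxA_succ (x : Int × Int) (l : List (Int × Int)) (n : Nat) :
    pvIdxA (x :: l) ((n : Int) + 1) = pvIdxA l (n : Int) := by
  simp only [pvIdxA]
  have h1 : ((n : Int) + 1) = ((n + 1 : Nat) : Int) := by push_cast; ring
  rw [h1, PySem.List.pyGet?_natCast, PySem.List.pyGet?_natCast]
  simp

theorem pvIdxA_one (x : Int × Int) (l : List (Int × Int)) : pvIdxA (x :: l) 1 = pvIdxA l 0 :=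
  pvIdxA_succ x l 0
theorem pvIdxA_two (x : Int × Int) (l : List (Int × Int)) : pvIdxA (x :: l) 2 = pvIdxA l 1 :=
  pvIdxA_succ x l 1
theorem pvIdxA_three (x : Int × Int) (l : List (Int × Int)) : pvIdxA (x :: l) 3 = pvIdxA l 2 :=
  pvIdxA_succ x l 2
theorem pvIdxA_four (x : Int × Int) (l : List (Int × Int)) : pvIdxA (x :: l) 4 = pvIdxA l 3 :=
  pvIdxA_succ x l 3
theorem pvGet_succ (x : Int) (l : List Int) (n : Nat) :
    PySem.List.pyGet? (x :: l) ((n : Int) + 1) = PySem.List.pyGet? l (n : Int) := by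
  have h1 : ((n : Int) + 1) = ((n + 1 : Nat) : Int) := by push_cast; ring
  rw [h1, PySem.List.pyGet?_natCast, PySem.List.pyGet?_natCast]
  simp

theorem pvGet_one (x : Int) (l : List Int) : PySem.List.pyGet? (x :: l) 1 = PySem.List.pyGet? l 0 :=
  pvGet_succ x l 0
theorem pvGet_two (x : Int) (l : List Int) : PySem.List.pyGet? (x :: l) 2 = PySem.List.pyGet? l 1 :=
  pvGet_succ x l 1
theorem pvGet_three (x : Int) (l : List Int) : PySem.List.pyGet? (x :: l) 3 = PySem.List.pyGet? l 2 :=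
  pvGet_succ x l 2
theorem pvGet_four (x : Int) (l : List Int) : PySem.List.pyGet? (x :: l) 4 = PySem.List.pyGet? l 3 :=
  pvGet_succ x l 3

theorem pvRange02 : PySem.List.pyRange 0 2 1 = [0, 1] := by decide
theorem pvRange14 : PySem.List.pyRange 1 4 1 = [1, 2, 3] := by decide
theorem pvRange05 : PySem.List.pyRange 0 5 1 = [0, 1, 2, 3, 4] := by decide
theorem pvRange03 : PySem.List.pyRange 0 3 1 = [0, 1, 2] := by decide
theorem pvRange13 : PySem.List.pyRange 1 3 1 = [1, 2] := by decide
theorem pvRange04 : PySem.List.pyRange 0 4 1 = [0, 1, 2, 3] := by decide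

-- the core dispatches agree on any bucket partition a 5-7 card no-straight hand can produce
set_option maxHeartbeats 4000000 in
theorem pvCore_eq (s p t q : List Int)
    (hs : s.Pairwise (fun a b => b < a)) (hp : p.Pairwise (fun a b => b < a))
    (ht : t.Pairwise (fun a b => b < a)) (hq : q.Pairwise (fun a b => b < a))
    (hnd : (q ++ t ++ p ++ s).Nodup)
    (h5 : 5 ≤ 4 * q.length + 3 * t.length + 2 * p.length + s.length)
    (h7 : 4 * q.length + 3 * t.length + 2 * p.length + s.length ≤ 7)
    (hexcl : ¬(q = [] ∧ t = [] ∧ s = [] ∧ p.length = 3)) :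
    pvCoreA (q.map (fun v => (v, (4 : Int))) ++ t.map (fun v => (v, (3 : Int))) ++
             p.map (fun v => (v, (2 : Int))) ++ s.map (fun v => (v, (1 : Int)))) = pvCoreB s p t q := by
  rcases q with _ | ⟨q0, _ | ⟨q1, q⟩⟩ <;>
  rcases t with _ | ⟨t0, _ | ⟨t1, _ | ⟨t2, t⟩⟩⟩ <;>
  rcases p with _ | ⟨p0, _ | ⟨p1, _ | ⟨p2, _ | ⟨p3, p⟩⟩⟩⟩ <;>
  rcases s with _ | ⟨s0, _ | ⟨s1, _ | ⟨s2, _ | ⟨s3, _ | ⟨s4, _ | ⟨s5, _ | ⟨s6, s⟩⟩⟩⟩⟩⟩⟩ <;>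
    first
    | (exfalso; simp only [List.length_cons, List.length_nil] at h5 h7; omega)
    | (exact absurd ⟨rfl, rfl, rfl, rfl⟩ hexcl)
    | (simp only [List.pairwise_cons, List.mem_cons, List.not_mem_nil, List.nodup_cons,
         List.append_nil, List.nil_append, List.cons_append, List.nodup_nil,
         forall_eq_or_imp, forall_eq, false_implies, or_false, and_true,
         not_or] at hs hp ht hq hnd
       simp only [pvCoreA, pvCoreB, List.map_cons, List.map_nil, List.cons_append,
         List.nil_append, List.append_nil]
       simp [pvIdxA_zero, pvIdxA_one, pvIdxA_two, pvIdxA_three, pvIdxA_four,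
         pvRange02, pvRange14, pvRange05, pvRange03, pvRange13, pvRange04,
         pvGet_one, pvGet_two, pvGet_three, pvGet_four,
         PySem.List.slice_from, PySem.List.max?]
       first
       | done
       | omega
       | (split_ifs <;> (try simp) <;> (try split_ifs) <;> (try simp) <;> omega))

-- ===== VERDICT (by name: the statement is the Claim_ definition above) =====
theorem No_straight_hand_spec : Claim_equal_No_straight_hand := by
  intro p_values _ hPre
  obtain ⟨hlen5, hlen7, hcnt4, hexcl⟩ := hPre
  show No_straight_hand p_values = No_straight_hand_alt p_values
  rw [No_straight_hand, No_straight_hand_alt]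
  simp only [pvCountsB_eq, pvEntries_eq, PySem.Dict.keys_counter]
  set f : Int → Int := fun v => ((p_values.count v : Nat) : Int) with hf_def
  set KS := PySem.List.sorted (PySem.Set.ofList p_values) (fun x => x) true with hKS_def
  -- the four buckets are the multiplicity filters of KS
  have hbucket : ∀ c : Int, c = 1 ∨ c = 2 ∨ c = 3 ∨ c = 4 →
      (KS.foldl (fun g v => g.modify ((PySem.Dict.counter p_values).getD v 0) [] (fun l => l ++ [v]))
        (((((PySem.Dict.empty).insert 1 []).insert 2 []).insert 3 []).insert 4 [] : PySem.Dict Int (List Int))).getD c []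
      = KS.filter (fun v => f v == c) := by
    intro c hc
    rw [pvBucket_eq KS (PySem.Dict.counter p_values) c hc]
    exact List.filter_congr (fun v _ => by rw [PySem.Dict.getD_counter])
  rw [hbucket 1 (by norm_num), hbucket 2 (by norm_num), hbucket 3 (by norm_num), hbucket 4 (by norm_num)]
  set B1 := KS.filter (fun v => f v == 1)
  set B2 := KS.filter (fun v => f v == 2)
  set B3 := KS.filter (fun v => f v == 3)
  set B4 := KS.filter (fun v => f v == 4)
  -- facts about KS
  have hKSperm : KS.Perm (PySem.Set.ofList p_values) := PySem.List.sorted_perm _ _ _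
  have hKSnodup : KS.Nodup := (hKSperm.nodup_iff).mpr (PySem.Set.nodup_ofList p_values)
  have hKSdesc : KS.Pairwise (fun a b : Int => b < a) := by
    have h1 : KS.Pairwise (fun a b : Int => b ≤ a) := PySem.List.sorted_pairwise_rev _ _
    exact (h1.and hKSnodup).imp (fun h => lt_of_le_of_ne h.1 (Ne.symm h.2))
  have hmemKS : ∀ v ∈ KS, v ∈ p_values := by
    intro v hv
    exact (PySem.Set.mem_ofList p_values v).mp (hKSperm.mem_iff.mp hv)
  have hfKS : ∀ v ∈ KS, f v = 1 ∨ f v = 2 ∨ f v = 3 ∨ f v = 4 := by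
    intro v hv
    have h1 : 0 < p_values.count v := List.count_pos_iff.mpr (hmemKS v hv)
    have h2 := hcnt4 v (hmemKS v hv)
    simp only [hf_def]
    omega
  -- bucket facts
  have hBdesc : ∀ c : Int, (KS.filter (fun v => f v == c)).Pairwise (fun a b : Int => b < a) :=
    fun c => hKSdesc.sublist List.filter_sublist
  have hBmem : ∀ (c : Int), ∀ v ∈ KS.filter (fun v => f v == c), f v = c := by
    intro c v hv
    have := (List.mem_filter.mp hv).2
    simpa using this
  have hconcat_perm : (B4 ++ B3 ++ B2 ++ B1).Perm KS := pvPartition_perm KS f hfKS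
  -- items of the counter
  have hitems : (PySem.Dict.counter p_values).items
      = (PySem.Set.ofList p_values).map (fun k => (k, f k)) := PySem.Dict.items_counter p_values
  have hfstnodup : (((PySem.Dict.counter p_values).items).map Prod.fst).Nodup := by
    rw [hitems, List.map_map]
    have : (Prod.fst ∘ fun k => ((k : Int), f k)) = id := rfl
    rw [this, List.map_id]
    exact PySem.Set.nodup_ofList p_values
  set E := PySem.List.sorted2 (PySem.Dict.counter p_values).items (fun kv => -kv.2) (fun kv => -kv.1) false with hE_def
  have hEpw : E.Pairwise pvLexGT := pvFoldB_pairwise _ hfstnodup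
  have hEperm : E.Perm ((PySem.Dict.counter p_values).items) := PySem.List.sorted2_perm _ _ _ _
  -- the (count desc, value desc) entry list is the concatenation of the buckets
  have hmapc : ∀ c : Int, (KS.filter (fun v => f v == c)).map (fun v => (v, c))
      = (KS.filter (fun v => f v == c)).map (fun v => (v, f v)) :=
    fun c => List.map_congr_left (fun v hv => by rw [hBmem c v hv])
  have hconcat_eq : B4.map (fun v => (v, (4:Int))) ++ B3.map (fun v => (v, (3:Int))) ++
      B2.map (fun v => (v, (2:Int))) ++ B1.map (fun v => (v, (1:Int)))
      = (B4 ++ B3 ++ B2 ++ B1).map (fun v => (v, f v)) := by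
    rw [hmapc 4, hmapc 3, hmapc 2, hmapc 1]
    simp only [List.map_append]
    rfl
  have hconcat_pw : (B4.map (fun v => (v, (4:Int))) ++ B3.map (fun v => (v, (3:Int))) ++
      B2.map (fun v => (v, (2:Int))) ++ B1.map (fun v => (v, (1:Int)))).Pairwise pvLexGT := by
    have hone : ∀ c : Int, ((KS.filter (fun v => f v == c)).map (fun v => (v, c))).Pairwise pvLexGT := by
      intro c
      rw [List.pairwise_map]
      exact (hBdesc c).imp (fun h => Or.inr ⟨rfl, h⟩)
    have hcross : ∀ (c d : Int), d < c → ∀ x ∈ (KS.filter (fun v => f v == c)).map (fun v => (v, c)),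
        ∀ y ∈ (KS.filter (fun v => f v == d)).map (fun v => (v, d)), pvLexGT x y := by
      intro c d hdc x hx y hy
      rcases List.mem_map.mp hx with ⟨a, _, rfl⟩
      rcases List.mem_map.mp hy with ⟨b, _, rfl⟩
      exact Or.inl hdc
    rw [List.pairwise_append, List.pairwise_append, List.pairwise_append]
    refine ⟨⟨⟨hone 4, hone 3, fun x hx y hy => hcross 4 3 (by norm_num) x hx y hy⟩,
      hone 2, ?_⟩, hone 1, ?_⟩
    · intro x hx y hy
      rcases List.mem_append.mp hx with hx | hx
      · exact hcross 4 2 (by norm_num) x hx y hy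
      · exact hcross 3 2 (by norm_num) x hx y hy
    · intro x hx y hy
      rcases List.mem_append.mp hx with hx | hx
      rcases List.mem_append.mp hx with hx' | hx'
      · exact hcross 4 1 (by norm_num) x hx' y hy
      · exact hcross 3 1 (by norm_num) x hx' y hy
      · exact hcross 2 1 (by norm_num) x hx y hy
  have hE_eq : E = B4.map (fun v => (v, (4:Int))) ++ B3.map (fun v => (v, (3:Int))) ++
      B2.map (fun v => (v, (2:Int))) ++ B1.map (fun v => (v, (1:Int))) := by
    refine pvEq_of_perm_of_pairwise ?_ hEpw hconcat_pw
    rw [hconcat_eq]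
    refine hEperm.trans ?_
    rw [hitems]
    exact ((hconcat_perm.trans hKSperm).map _).symm
  -- the total number of cards
  have hcastsum : ∀ (l : List Int) (g : Int → Nat),
      ((l.map (fun k => ((g k : Nat) : Int))).sum) = (((l.map g).sum : Nat) : Int) := by
    intro l g; induction l with
    | nil => simp
    | cons x l ih => simp [ih]
  have hsumKS : (KS.map f).sum = (p_values.length : Int) := by
    rw [(hKSperm.map f).sum_eq]
    have hdperm : (PySem.Set.ofList p_values).Perm p_values.dedup := by
      rw [List.perm_ext_iff_of_nodup (PySem.Set.nodup_ofList p_values) (List.nodup_dedup p_values)]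
      intro a
      rw [PySem.Set.mem_ofList, List.mem_dedup]
    rw [(hdperm.map _).sum_eq]
    simp only [hf_def]
    rw [hcastsum p_values.dedup (fun k => p_values.count k)]
    exact_mod_cast congrArg (fun m : Nat => (m : Int)) (List.sum_map_count_dedup_eq_length p_values)
  have hsumB : ∀ c : Int, ((KS.filter (fun v => f v == c)).map f).sum
      = c * ((KS.filter (fun v => f v == c)).length : Int) := by
    intro c
    have h1 : (KS.filter (fun v => f v == c)).map f = (KS.filter (fun v => f v == c)).map (fun _ => c) :=
      List.map_congr_left (fun v hv => hBmem c v hv)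
    rw [h1]
    simp [mul_comm]
  have htot : 4 * B4.length + 3 * B3.length + 2 * B2.length + B1.length = p_values.length := by
    have h1 : ((B4 ++ B3 ++ B2 ++ B1).map f).sum = (p_values.length : Int) := by
      rw [(hconcat_perm.map f).sum_eq]; exact hsumKS
    simp only [List.map_append, List.sum_append] at h1
    have e4 : (List.map f B4).sum = 4 * (B4.length : Int) := hsumB 4
    have e3 : (List.map f B3).sum = 3 * (B3.length : Int) := hsumB 3
    have e2 : (List.map f B2).sum = 2 * (B2.length : Int) := hsumB 2
    have e1 : (List.map f B1).sum = 1 * (B1.length : Int) := hsumB 1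
    rw [e4, e3, e2, e1] at h1
    omega
  have hexcl' : ¬(B4 = [] ∧ B3 = [] ∧ B1 = [] ∧ B2.length = 3) := by
    rintro ⟨h4e, h3e, h1e, h2l⟩
    have hz4 : B4.length = 0 := by rw [h4e]; rfl
    have hz3 : B3.length = 0 := by rw [h3e]; rfl
    have hz1 : B1.length = 0 := by rw [h1e]; rfl
    apply hexcl
    refine ⟨by omega, ?_, ?_⟩
    · have hl1 := hconcat_perm.length_eq
      have hl2 := hKSperm.length_eq
      simp only [h4e, h3e, h1e, List.append_nil, List.nil_append] at hl1
      omega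
    · intro v hv
      have hvS : v ∈ PySem.Set.ofList p_values := (PySem.Set.mem_ofList p_values v).mpr hv
      have hvB2 : v ∈ B2 := by
        have := (hconcat_perm.trans hKSperm).mem_iff.mpr hvS
        simpa [h4e, h3e, h1e] using this
      have := hBmem 2 v hvB2
      simp only [hf_def] at this
      omega
  rw [hE_eq]
  exact pvCore_eq B1 B2 B3 B4 (hBdesc 1) (hBdesc 2) (hBdesc 3) (hBdesc 4)
    (hconcat_perm.nodup_iff.mpr hKSnodup) (by omega) (by omega) hexcl'
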